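-- pv_equiv track=rewrite | github.com/alberdilab/squirrel_diet | workflow/scripts/assign_taxonomy.py | find_finest_common_taxon
-- ===== SOURCE A (Python) =====
-- def find_finest_common_taxon(tax_list):
--     """
--     Given multiple taxonomic classifications, find the finest shared level.
--     """
--     split_taxonomies = [t.split(";") for t in tax_list]
--
--     # Determine the common taxonomic levels
--     min_length = min(map(len, split_taxonomies))  # Find shortest classification
--     common_taxon = []
--
--     for i in range(min_length):
--         level = {tax[i] for tax in split_taxonomies}  # Collect unique values at this level
--         if len(level) == 1:  # If all alignments share the same level, keep it
--             common_taxon.append(list(level)[0])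
--         else:  # Stop at the last common level
--             break
--
--     return ";".join(common_taxon)
-- ===== SOURCE B (Python) =====
-- def find_finest_common_taxon(tax_list):
--     """
--     Given multiple taxonomic classifications, find the finest shared level.
--     Fold pairwise: reduce the split taxonomies with a two-list shared-prefix helper.
--     """
--     first, *rest = (t.split(";") for t in tax_list)
--     common = first
--     for levels in rest:
--         common = _shared_prefix(common, levels)
--     return ";".join(common)
--
--
-- def _shared_prefix(a, b):
--     out = []
--     for x, y in zip(a, b):
--         if x != y:
--             break
--         out.append(x)
--     return out
-- ===== Notes on version B (the rewrite author's own statement) =====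
-- stated objective: alternative
-- what changed: Replaces the per-level scan (for each index, build the set of values across all rows) with a pairwise fold: reduce the split taxonomies with a two-list shared-prefix helper, so the accumulator shrinks to the common prefix.
import Mathlib
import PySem

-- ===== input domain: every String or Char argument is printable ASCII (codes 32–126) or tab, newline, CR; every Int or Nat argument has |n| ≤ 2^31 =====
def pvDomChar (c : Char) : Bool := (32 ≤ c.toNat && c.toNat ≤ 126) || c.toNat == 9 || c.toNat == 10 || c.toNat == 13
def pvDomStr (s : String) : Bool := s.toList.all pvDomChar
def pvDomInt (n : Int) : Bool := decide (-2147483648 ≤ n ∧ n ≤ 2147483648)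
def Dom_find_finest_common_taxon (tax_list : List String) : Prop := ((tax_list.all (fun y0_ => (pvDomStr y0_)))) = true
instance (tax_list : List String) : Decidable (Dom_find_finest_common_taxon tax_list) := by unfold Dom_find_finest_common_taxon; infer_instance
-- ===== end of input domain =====

-- B replaces A's per-level scan over all rows by a pairwise fold with a two-list
-- shared-prefix helper; same result, stated objective: alternative decomposition.

-- ===== PORT A =====
-- t.split(";") — sep is the nonempty literal ";", so split? is always some; getD is exact here.
def pvSplitSemi (t : String) : List String := (PySem.Str.split? t ";").getD []

-- the set {tax[i] for tax in split_taxonomies}; indices used are < every length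
-- (guaranteed at every call site: i < min_length), so getD "" is exact.
def pvALevel (sts : List (List String)) (i : Nat) : PySem.Set String :=
  PySem.Set.ofList (sts.map (fun tax => (PySem.List.pyGet? tax (i : Int)).getD ""))

-- the 'for i in range(min_length): … else: break' loop, appending = building front-to-back
def pvALoop (sts : List (List String)) (i : Nat) : Nat → List String
  | 0 => []
  | fuel + 1 =>
      let level := pvALevel sts i
      if PySem.Set.len level = 1 then level.head! :: pvALoop sts (i + 1) fuel else []

def find_finest_common_taxon (tax_list : List String) : String :=
  let split_taxonomies := tax_list.map pvSplitSemi
  -- min(map(len, split_taxonomies)); raises ValueError on an empty list (excluded by Pre_)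
  let min_length :=
    ((PySem.List.min? (split_taxonomies.map (fun l => (l.length : Int))) (fun x => x)).getD 0).toNat
  PySem.Str.join ";" (pvALoop split_taxonomies 0 min_length)

-- ===== PORT B =====
-- _shared_prefix: lockstep over the two lists, stop at the first mismatch
def pvSharedPrefix : List String → List String → List String
  | x :: a, y :: b => if x = y then x :: pvSharedPrefix a b else []
  | _, _ => []

def find_finest_common_taxon_alt (tax_list : List String) : String :=
  match tax_list.map pvSplitSemi with
  | [] => ""   -- Python raises ValueError (unpacking) here; excluded by Pre_
  | first :: rest => PySem.Str.join ";" (rest.foldl pvSharedPrefix first)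

-- ===== PRECONDITION & SPEC =====
-- A raises ValueError (min of an empty sequence) on the empty list; excluded.
def Pre_find_finest_common_taxon (tax_list : List String) : Prop := tax_list ≠ []
instance (tax_list : List String) : Decidable (Pre_find_finest_common_taxon tax_list) := by
  unfold Pre_find_finest_common_taxon; infer_instance

def pvWitness_find_finest_common_taxon : List String := ["a;b;c", "a;b;d"]

def Spec_find_finest_common_taxon (tax_list : List String) (out : String) : Prop := out = find_finest_common_taxon_alt tax_list
instance (tax_list : List String) (out : String) : Decidable (Spec_find_finest_common_taxon tax_list out) := by unfold Spec_find_finest_common_taxon; infer_instance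

-- ===== CLAIM (what is proved, stated in full; the proofs are below) =====
def Claim_equal_find_finest_common_taxon : Prop := ∀ (tax_list : List String), Dom_find_finest_common_taxon tax_list → Pre_find_finest_common_taxon tax_list → Spec_find_finest_common_taxon tax_list (find_finest_common_taxon tax_list)

-- ===== LEMMAS AND PROOFS =====

-- B's helper computes a common prefix …
theorem sp_prefix_left : ∀ (a b : List String), pvSharedPrefix a b <+: a := by
  intro a
  induction a with
  | nil => intro b; cases b <;> simp [pvSharedPrefix]
  | cons x a ih =>
      intro b
      cases b with
      | nil => simp [pvSharedPrefix]
      | cons y b =>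
          by_cases h : x = y <;> simp [pvSharedPrefix, h]
          exact ih b

theorem sp_prefix_right : ∀ (a b : List String), pvSharedPrefix a b <+: b := by
  intro a
  induction a with
  | nil => intro b; cases b <;> simp [pvSharedPrefix]
  | cons x a ih =>
      intro b
      cases b with
      | nil => simp [pvSharedPrefix]
      | cons y b =>
          by_cases h : x = y <;> simp [pvSharedPrefix, h]
          exact ih b

-- … and the largest one.
theorem sp_max : ∀ (M a b : List String), M <+: a → M <+: b → M <+: pvSharedPrefix a b := by
  intro M
  induction M with
  | nil => intro a b _ _; exact List.nil_prefix
  | cons m M ih =>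
      intro a b ha hb
      cases a with
      | nil => exact absurd (List.IsPrefix.length_le ha) (by simp)
      | cons x a =>
          cases b with
          | nil => exact absurd (List.IsPrefix.length_le hb) (by simp)
          | cons y b =>
              obtain ⟨hmx, ha'⟩ := List.cons_prefix_cons.mp ha
              obtain ⟨hmy, hb'⟩ := List.cons_prefix_cons.mp hb
              have hxy : x = y := by rw [← hmx, ← hmy]
              simp [pvSharedPrefix, hxy]
              exact ⟨hmy, ih a b ha' hb'⟩

-- B's fold is a common prefix of every row …
theorem fold_prefix : ∀ (rest : List (List String)) (first t : List String),
    t ∈ first :: rest → rest.foldl pvSharedPrefix first <+: t := by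
  intro rest
  induction rest with
  | nil => intro first t ht; simp at ht; simp [ht]
  | cons r rest ih =>
      intro first t ht
      simp only [List.foldl_cons]
      rcases List.mem_cons.mp ht with rfl | ht'
      · exact (ih (pvSharedPrefix t r) (pvSharedPrefix t r)
          (by simp)).trans (sp_prefix_left t r)
      · rcases List.mem_cons.mp ht' with rfl | ht''
        · exact (ih (pvSharedPrefix first t) (pvSharedPrefix first t)
            (by simp)).trans (sp_prefix_right first t)
        · exact ih (pvSharedPrefix first r) t (by simp [ht''])

-- … and the largest one.
theorem fold_max : ∀ (rest : List (List String)) (first M : List String),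
    (∀ t ∈ first :: rest, M <+: t) → M <+: rest.foldl pvSharedPrefix first := by
  intro rest
  induction rest with
  | nil => intro first M h; exact h first (by simp)
  | cons r rest ih =>
      intro first M h
      simp only [List.foldl_cons]
      refine ih (pvSharedPrefix first r) M ?_
      intro t ht
      rcases List.mem_cons.mp ht with rfl | ht'
      · exact sp_max M first r (h first (by simp)) (h r (by simp))
      · exact h t (by simp [ht'])

-- a Python set of known size 1: every source element is its unique element
theorem set_all_eq_head {l : List String} (h : PySem.Set.len (PySem.Set.ofList l) = 1) :
    ∀ a ∈ l, a = (PySem.Set.ofList l).head! := by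
  have hlen : (PySem.Set.ofList l).length = 1 := by
    have := h; unfold PySem.Set.len at this; omega
  obtain ⟨x, hx⟩ := List.length_eq_one_iff.mp hlen
  intro a ha
  have : a ∈ PySem.Set.ofList l := (PySem.Set.mem_ofList l a).mpr ha
  rw [hx] at this ⊢
  simpa using this

theorem set_len_one_of_all_eq {l : List String} (hne : l ≠ []) (x : String)
    (h : ∀ a ∈ l, a = x) : PySem.Set.len (PySem.Set.ofList l) = 1 := by
  have hxmem : x ∈ PySem.Set.ofList l := by
    rcases l with _ | ⟨a, l⟩
    · exact absurd rfl hne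
    · exact (PySem.Set.mem_ofList _ x).mpr (by
        have := h a (by simp); simp [← this])
  have hall : ∀ a ∈ PySem.Set.ofList l, a = x := by
    intro a ha; exact h a ((PySem.Set.mem_ofList l a).mp ha)
  have hnd := PySem.Set.nodup_ofList l
  have : PySem.Set.ofList l = [x] := by
    rcases hs : PySem.Set.ofList l with _ | ⟨y, t⟩
    · rw [hs] at hxmem; simp at hxmem
    · rw [hs] at hall hnd
      have hy : y = x := hall y (by simp)
      have ht : t = [] := by
        rcases t with _ | ⟨z, t⟩
        · rfl
        · have hz : z = x := hall z (by simp)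
          simp [hy, hz] at hnd
      rw [hy, ht]
  unfold PySem.Set.len
  rw [this]; rfl

-- A's loop yields a common prefix of every remaining row …
theorem aloop_prefix : ∀ (fuel : Nat) (sts : List (List String)) (i : Nat),
    (∀ t ∈ sts, i + fuel ≤ t.length) →
    ∀ t ∈ sts, pvALoop sts i fuel <+: t.drop i := by
  intro fuel
  induction fuel with
  | zero => intro sts i _ t _; simp [pvALoop]
  | succ fuel ih =>
      intro sts i hlen t ht
      simp only [pvALoop]
      split
      · rename_i hone
        have hit : i < t.length := by have := hlen t ht; omega
        have hval : (PySem.List.pyGet? t (i : Int)).getD "" = t[i] := by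
          rw [PySem.List.pyGet?_natCast, List.getElem?_eq_getElem hit]; rfl
        have hhead : t[i] = (pvALevel sts i).head! := by
          have := set_all_eq_head (l := sts.map (fun tax => (PySem.List.pyGet? tax (i : Int)).getD "")) hone
            ((PySem.List.pyGet? t (i : Int)).getD "") (by exact List.mem_map_of_mem ht)
          rw [← hval]; exact this
        rw [List.drop_eq_getElem_cons hit, ← hhead]
        refine List.cons_prefix_cons.mpr ⟨rfl, ?_⟩
        exact ih sts (i + 1) (fun u hu => by have := hlen u hu; omega) t ht
      · exact List.nil_prefix
  
-- … and the largest one of length at most the fuel.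
theorem aloop_max : ∀ (fuel : Nat) (sts : List (List String)) (i : Nat) (M : List String),
    sts ≠ [] →
    (∀ t ∈ sts, i + fuel ≤ t.length) →
    (∀ t ∈ sts, M <+: t.drop i) →
    M.length ≤ fuel →
    M <+: pvALoop sts i fuel := by
  intro fuel
  induction fuel with
  | zero =>
      intro sts i M _ _ _ hMlen
      have : M = [] := List.length_eq_zero_iff.mp (by omega)
      simp [this]
  | succ fuel ih =>
      intro sts i M hne hlen hpre hMlen
      rcases M with _ | ⟨a, M⟩
      · exact List.nil_prefix
      · -- every value at index i equals a
        have hv : ∀ t ∈ sts, (PySem.List.pyGet? t (i : Int)).getD "" = a := by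
          intro t ht
          have hit : i < t.length := by have := hlen t ht; omega
          have hd := hpre t ht
          rw [List.drop_eq_getElem_cons hit] at hd
          obtain ⟨ha, _⟩ := List.cons_prefix_cons.mp hd
          rw [PySem.List.pyGet?_natCast, List.getElem?_eq_getElem hit]
          simpa using ha.symm
        have hmapne : sts.map (fun tax => (PySem.List.pyGet? tax (i : Int)).getD "") ≠ [] := by
          simpa using hne
        have hone : PySem.Set.len (pvALevel sts i) = 1 := by
          unfold pvALevel
          exact set_len_one_of_all_eq hmapne a (by
            intro b hb
            obtain ⟨t, ht, rfl⟩ := List.mem_map.mp hb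
            exact hv t ht)
        simp only [pvALoop, hone, if_pos]
        have hhead : (pvALevel sts i).head! = a := by
          rcases sts with _ | ⟨t0, sts'⟩
          · exact absurd rfl hne
          · have h0 : (PySem.List.pyGet? t0 (i : Int)).getD "" = a := hv t0 (by simp)
            have := set_all_eq_head (l := (t0 :: sts').map (fun tax => (PySem.List.pyGet? tax (i : Int)).getD "")) hone
              ((PySem.List.pyGet? t0 (i : Int)).getD "") (by simp)
            unfold pvALevel
            rw [← this, h0]
        rw [hhead]
        refine List.cons_prefix_cons.mpr ⟨rfl, ?_⟩
        refine ih sts (i + 1) M hne (fun u hu => by have := hlen u hu; omega) ?_ (by simpa using hMlen)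
        intro t ht
        have hit : i < t.length := by have := hlen t ht; omega
        have hd := hpre t ht
        rw [List.drop_eq_getElem_cons hit] at hd
        exact (List.cons_prefix_cons.mp hd).2

-- ===== VERDICT (by name: the statement is the Claim_ definition above) =====
theorem find_finest_common_taxon_spec : Claim_equal_find_finest_common_taxon := by
  intro tax_list _ hpre
  unfold Spec_find_finest_common_taxon
  unfold find_finest_common_taxon find_finest_common_taxon_alt
  rcases hsts : tax_list.map pvSplitSemi with _ | ⟨first, rest⟩
  · exact absurd (List.map_eq_nil_iff.mp hsts) hpre
  · show PySem.Str.join ";"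
        (pvALoop (first :: rest) 0
          (((PySem.List.min? ((first :: rest).map (fun l => (l.length : Int))) (fun x => x)).getD 0).toNat)) =
      PySem.Str.join ";" (rest.foldl pvSharedPrefix first)
    rcases hmin : PySem.List.min? ((first :: rest).map (fun l => (l.length : Int))) (fun x => x) with _ | v
    · rw [PySem.List.min?_eq_none_iff] at hmin; simp at hmin
    · obtain ⟨t0, ht0mem, ht0len⟩ := List.mem_map.mp (PySem.List.min?_mem hmin)
      have hminle : ∀ t ∈ first :: rest, v ≤ (t.length : Int) :=
        fun t ht => PySem.List.min?_isMin hmin _ (List.mem_map_of_mem ht)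
      have hv0 : 0 ≤ v := by rw [← ht0len]; positivity
      have hlen : ∀ t ∈ first :: rest, v.toNat ≤ t.length := by
        intro t ht; have := hminle t ht; omega
      have hA := aloop_prefix v.toNat (first :: rest) 0 (by simpa using hlen)
      have hB1 := fold_prefix rest first
      have hAB : pvALoop (first :: rest) 0 v.toNat <+: rest.foldl pvSharedPrefix first := by
        refine fold_max rest first _ ?_
        intro t ht
        simpa using hA t ht
      have hBA : rest.foldl pvSharedPrefix first <+: pvALoop (first :: rest) 0 v.toNat := by
        refine aloop_max v.toNat (first :: rest) 0 _ (by simp) (by simpa using hlen) ?_ ?_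
        · intro t ht
          rw [List.drop_zero]
          exact hB1 t ht
        · have := (hB1 t0 ht0mem).length_le
          omega
      have heq : pvALoop (first :: rest) 0 v.toNat = rest.foldl pvSharedPrefix first :=
        hAB.eq_of_length (le_antisymm hAB.length_le hBA.length_le)
      rw [hmin, Option.getD_some, heq]
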